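-- pv_equiv track=rewrite | github.com/FakeYou/advent-of-code | day-25/solve.py | part1
-- ===== SOURCE A (Python) =====
-- def part1(column, row):
--     code = 20151125
--     row = column + row - 1
--     box = 1
--     c = 0
--
--     while row > 0:
--         box += c
--         row -= 1
--         c += 1
--
--     box += column - 1
--
--     while box > 1:
--         box -= 1
--         code = code * 252533
--         code = code % 33554393
--
--     return code
-- ===== SOURCE B (Python) =====
-- def part1(column, row):
--     n = column + row - 1
--     t = n * (n - 1) // 2 if n > 0 else 0
--     box = t + column
--     e = max(box - 1, 0)
--     return (20151125 * pow(252533, e, 33554393)) % 33554393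
-- ===== Notes on version B (the rewrite author's own statement) =====
-- stated objective: faster
-- what changed: Replaces both while-loops (triangular counting and repeated modular multiplication) with the closed-form triangular index and one built-in three-argument pow (modular exponentiation).
import Mathlib
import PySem

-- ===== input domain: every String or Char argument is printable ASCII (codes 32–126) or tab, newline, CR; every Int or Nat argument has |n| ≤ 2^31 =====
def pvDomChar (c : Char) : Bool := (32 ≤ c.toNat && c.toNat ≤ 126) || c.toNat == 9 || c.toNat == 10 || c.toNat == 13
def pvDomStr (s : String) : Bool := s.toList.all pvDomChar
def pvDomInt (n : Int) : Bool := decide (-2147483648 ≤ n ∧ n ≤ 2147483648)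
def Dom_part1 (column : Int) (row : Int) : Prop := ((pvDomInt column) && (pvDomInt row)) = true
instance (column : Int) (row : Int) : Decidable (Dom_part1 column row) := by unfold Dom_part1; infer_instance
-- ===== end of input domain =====

-- B replaces both while-loops by the closed-form triangular index and one modular exponentiation.

-- ===== PORT A =====
-- first while loop: while row > 0: box += c; row -= 1; c += 1
def part1Loop1 (row : Int) (box : Int) (c : Int) : Int :=
  if row > 0 then part1Loop1 (row - 1) (box + c) (c + 1) else box
termination_by row.toNat
decreasing_by omega

-- second while loop: while box > 1: box -= 1; code = code * 252533 % 33554393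
def part1Loop2 (box : Int) (code : Int) : Int :=
  if box > 1 then part1Loop2 (box - 1) (PySem.Int.mod (code * 252533) 33554393) else code
termination_by box.toNat
decreasing_by omega

def part1 (column : Int) (row : Int) : Int :=
  part1Loop2 (part1Loop1 (column + row - 1) 1 0 + column - 1) 20151125

-- ===== PORT B =====
def part1_alt (column : Int) (row : Int) : Int :=
  let n := column + row - 1
  let t := if n > 0 then PySem.Int.floordiv (n * (n - 1)) 2 else 0
  let box := t + column
  let e := max (box - 1) 0
  PySem.Int.mod (20151125 * PySem.Int.powMod 252533 e.toNat 33554393) 33554393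

-- ===== PRECONDITION & SPEC =====
def Spec_part1 (column : Int) (row : Int) (out : Int) : Prop := out = part1_alt column row
instance (column : Int) (row : Int) (out : Int) : Decidable (Spec_part1 column row out) := by unfold Spec_part1; infer_instance

-- ===== CLAIM (what is proved, stated in full; the proofs are below) =====
def Claim_equal_part1 : Prop := ∀ (column : Int) (row : Int), Dom_part1 column row → Spec_part1 column row (part1 column row)

-- ===== LEMMAS AND PROOFS =====

-- triangular numbers, as the first loop accumulates them
def tri : Nat → Int
  | 0 => 0
  | Nat.succ k => tri k + k

theorem tri_double (k : Nat) : 2 * tri k = (k : Int) * ((k : Int) - 1) := by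
  induction k with
  | zero => simp [tri]
  | succ k ih =>
    rw [tri]
    push_cast
    push_cast at ih
    ring_nf
    ring_nf at ih
    linarith

theorem loop1_eq (row box c : Int) :
    part1Loop1 row box c = box + (row.toNat : Int) * c + tri row.toNat := by
  induction row, box, c using part1Loop1.induct with
  | case1 row box c h ih =>
    rw [part1Loop1, if_pos h, ih]
    have hk : row.toNat = (row - 1).toNat + 1 := by omega
    rw [hk, tri]
    push_cast
    ring
  | case2 row box c h =>
    rw [part1Loop1, if_neg h]
    have hk : row.toNat = 0 := by omega
    rw [hk]
    simp [tri]

theorem loop2_eq (box code : Int) :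
    part1Loop2 box code =
      if box > 1 then (code * 252533 ^ (box - 1).toNat) % 33554393 else code := by
  induction box, code using part1Loop2.induct with
  | case1 box code h ih =>
    rw [part1Loop2, if_pos h, ih, if_pos h]
    rw [PySem.Int.mod_eq_emod_of_pos (by norm_num)]
    by_cases h2 : box - 1 > 1
    · rw [if_pos h2]
      have hk : (box - 1).toNat = (box - 1 - 1).toNat + 1 := by omega
      rw [hk, pow_succ]
      rw [Int.mul_emod, Int.emod_emod_of_dvd _ dvd_rfl, ← Int.mul_emod]
      ring_nf
    · rw [if_neg h2]
      have hk : (box - 1).toNat = 1 := by omega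
      rw [hk, pow_one]
  | case2 box code h =>
    rw [part1Loop2, if_neg h, if_neg h]

-- ===== VERDICT (by name: the statement is the Claim_ definition above) =====
theorem part1_spec : Claim_equal_part1 := by
  intro column row _
  unfold Spec_part1 part1 part1_alt
  dsimp only
  set n := column + row - 1 with hn
  -- the closed-form t equals tri n.toNat
  have ht : (if n > 0 then PySem.Int.floordiv (n * (n - 1)) 2 else 0) = tri n.toNat := by
    by_cases h : n > 0
    · rw [if_pos h]
      have h2 : n * (n - 1) = 2 * tri n.toNat := by
        rw [tri_double]
        have : ((n.toNat : Int)) = n := by omega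
        rw [this]
      rw [h2, PySem.Int.floordiv_eq_ediv_of_pos (by norm_num),
        Int.mul_ediv_cancel_left _ (by norm_num)]
    · rw [if_neg h]
      have : n.toNat = 0 := by omega
      rw [this]; simp [tri]
  rw [ht]
  have hbox : part1Loop1 n 1 0 + column - 1 = tri n.toNat + column := by
    rw [loop1_eq]; ring
  rw [hbox, loop2_eq]
  set box := tri n.toNat + column with hbox'
  have hR : PySem.Int.mod (20151125 * PySem.Int.powMod 252533 (max (box - 1) 0).toNat 33554393) 33554393
      = (20151125 * 252533 ^ (max (box - 1) 0).toNat) % 33554393 := by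
    rw [PySem.Int.powMod, PySem.Int.mod_eq_emod_of_pos (by norm_num),
      PySem.Int.mod_eq_emod_of_pos (by norm_num)]
    rw [Int.mul_emod, Int.emod_emod_of_dvd _ dvd_rfl, ← Int.mul_emod]
  rw [hR]
  by_cases h : box > 1
  · rw [if_pos h]
    have hm : max (box - 1) 0 = box - 1 := by omega
    rw [hm]
  · rw [if_neg h]
    have hm : (max (box - 1) 0).toNat = 0 := by omega
    rw [hm, pow_zero, mul_one]
    decide
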